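-- pv_equiv track=rewrite | github.com/MrBrantCode/unitest_baseline | mut_generate/mist_train_cf/cf_35306/solution.py | binary_operation
-- ===== SOURCE A (Python) =====
-- def binary_operation(binary_string: str) -> int:
--     bzero = 0
--     bone = 0
--     new_line = ""
--
--     for val in binary_string:
--         if val == "0":
--             bzero += 1
--         else:
--             bone += 1
--         if bone > bzero:
--             new_line += "1"
--         else:
--             new_line += "0"
--
--     bin_value = int(new_line, 2)
--     reversed_value = new_line.replace("0", "t").replace("1", "0").replace("t", "1")
--     inverted = int(reversed_value, 2)
--     return bin_value * inverted
-- ===== SOURCE B (Python) =====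
-- def _chunk_value(balances, lo, hi):
--     # integer value of the majority bits of balances[lo:hi], by halving the range
--     if hi - lo <= 1:
--         return 1 if lo < hi and balances[lo] > 0 else 0
--     mid = (lo + hi) // 2
--     return (_chunk_value(balances, lo, mid) << (hi - mid)) + _chunk_value(balances, mid, hi)
--
-- def binary_operation(binary_string: str) -> int:
--     # Stage 1: map each character to a +/-1 delta (any non-'0' counts as a one, as in A).
--     deltas = [1 if ch != "0" else -1 for ch in binary_string]
--     # Stage 2: running balances (ones minus zeros over each prefix).
--     balances = []
--     total = 0
--     for d in deltas:
--         total += d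
--         balances.append(total)
--     # Stage 3: assemble the integer whose bit i is set iff the prefix balance is positive.
--     n = len(balances)
--     value = _chunk_value(balances, 0, n)
--     return value * ((1 << n) - 1 - value)
-- ===== Notes on version B (the rewrite author's own statement) =====
-- stated objective: alternative
-- what changed: B replaces A's single stateful pass (two counters, string concatenation, two int(s,2) parses, triple replace) by staged passes: map characters to +/-1 deltas, prefix-sum them into a balance list, assemble the integer whose bit i is set iff the prefix balance is positive by divide-and-conquer over the index range, and take the complement by the closed form (1<<n)-1-value.
-- outside the precondition, e.g. on binary_operation(''): A raises ValueError, B returns 0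
import Mathlib
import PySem

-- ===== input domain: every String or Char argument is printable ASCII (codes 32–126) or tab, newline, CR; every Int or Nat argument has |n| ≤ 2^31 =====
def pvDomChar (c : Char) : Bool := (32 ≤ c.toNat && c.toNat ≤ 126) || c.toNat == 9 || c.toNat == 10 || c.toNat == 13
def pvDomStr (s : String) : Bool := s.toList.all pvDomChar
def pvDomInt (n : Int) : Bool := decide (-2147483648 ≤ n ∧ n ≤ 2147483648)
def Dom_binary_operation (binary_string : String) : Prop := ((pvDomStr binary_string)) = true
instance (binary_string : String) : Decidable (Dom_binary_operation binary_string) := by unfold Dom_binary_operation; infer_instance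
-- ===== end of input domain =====

-- B replaces A's stateful string-building pass + int(·,2) + triple-replace pipeline by staged
-- passes (delta map, prefix sums, positional power-of-two sum; complement by closed form);
-- objective: alternative.


-- ===== PORT A =====
-- int(cs, 2), ported by hand for exactly the strings A feeds it: A only parses nonempty strings of
-- '0'/'1' characters, on which int(s, 2) is exactly this left-to-right digit fold (no whitespace,
-- sign, underscore or '0b'-prefix case can arise); none = ValueError on the empty string.
def pvIntBin? (cs : List Char) : Option Int :=
  if cs.isEmpty then none
  else some (cs.foldl (fun a c => 2 * a + (if c = '0' then 0 else 1)) 0)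

-- the body of A's `for val in binary_string` loop, state (bzero, bone, new_line)
def pvStepA (st : Int × Int × List Char) (val : Char) : Int × Int × List Char :=
  let bzero := if val = '0' then st.1 + 1 else st.1
  let bone  := if val = '0' then st.2.1 else st.2.1 + 1
  (bzero, bone, st.2.2 ++ [if bone > bzero then '1' else '0'])

def binary_operation (binary_string : String) : Int :=
  let st := binary_string.toList.foldl pvStepA (0, 0, [])
  let new_line := st.2.2
  let bin_value := (pvIntBin? new_line).getD 0   -- ValueError (empty input) is excluded by Pre_
  let reversed_value :=
    PySem.Chars.replace (PySem.Chars.replace (PySem.Chars.replace new_line ['0'] ['t']) ['1'] ['0']) ['t'] ['1']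
  let inverted := (pvIntBin? reversed_value).getD 0
  bin_value * inverted

-- ===== PORT B =====
-- stage 1: the delta comprehension
def pvDeltas (cs : List Char) : List Int := cs.map (fun ch => if ch ≠ '0' then 1 else -1)
-- stage 2: the body of B's accumulation loop, state (balances, total)
def pvStepAcc (st : List Int × Int) (d : Int) : List Int × Int :=
  (st.1 ++ [st.2 + d], st.2 + d)
-- stage 3: _chunk_value — divide-and-conquer assembly of the integer from the balance range;
-- balances[lo] is always in range when read (lo < hi ≤ len), so the .getD 0 never fires
def pvChunkVal (balances : List Int) (lo hi : Int) : Int :=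
  if hi - lo ≤ 1 then
    if lo < hi ∧ (PySem.List.pyGet? balances lo).getD 0 > 0 then 1 else 0
  else
    let mid := PySem.Int.floordiv (lo + hi) 2
    pvChunkVal balances lo mid <<< (hi - mid).toNat + pvChunkVal balances mid hi
termination_by (hi - lo).toNat
decreasing_by
  all_goals
    simp only [PySem.Int.floordiv_eq_ediv_of_pos (by norm_num : (0 : Int) < 2)]
    omega

def binary_operation_alt (binary_string : String) : Int :=
  let deltas := pvDeltas binary_string.toList
  let balances := (deltas.foldl pvStepAcc ([], 0)).1
  let n : Int := balances.length
  let value := pvChunkVal balances 0 n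
  value * (((1 : Int) <<< n.toNat) - 1 - value)

-- ===== PRECONDITION & SPEC =====
-- Pre_ excludes only the empty string, on which A's int('', 2) raises ValueError.
def Pre_binary_operation (binary_string : String) : Prop := binary_string ≠ ""
instance (binary_string : String) : Decidable (Pre_binary_operation binary_string) := by
  unfold Pre_binary_operation; infer_instance
def pvWitness_binary_operation : String := "10"

def Spec_binary_operation (binary_string : String) (out : Int) : Prop := out = binary_operation_alt binary_string
instance (binary_string : String) (out : Int) : Decidable (Spec_binary_operation binary_string out) := by
  unfold Spec_binary_operation; infer_instance

-- ===== CLAIM (what is proved, stated in full; the proofs are below) =====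
def Claim_equal_binary_operation : Prop := ∀ (binary_string : String), Dom_binary_operation binary_string → Pre_binary_operation binary_string → Spec_binary_operation binary_string (binary_operation binary_string)

-- ===== LEMMAS AND PROOFS =====

-- proof-only helpers: the numeric value of a bit string, the prefix-majority bit string of an
-- input (threaded balance b), running sums, and the bit flip
def pvBinval (l : List Char) : Int := l.foldl (fun a c => 2 * a + (if c = '0' then 0 else 1)) 0
def pvFlip (c : Char) : Char := if c = '0' then '1' else '0'
def pvBits (b : Int) : List Char → List Char
  | [] => []
  | c :: t =>
      let b' := b + (if c = '0' then -1 else 1)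
      (if b' > 0 then '1' else '0') :: pvBits b' t
def pvRun (t : Int) : List Int → List Int
  | [] => []
  | d :: ds => (t + d) :: pvRun (t + d) ds

theorem pvBinval_acc (l : List Char) :
    ∀ x : Int, l.foldl (fun a c => 2 * a + (if c = '0' then 0 else 1)) x
      = x * 2 ^ l.length + pvBinval l := by
  induction l with
  | nil => intro x; simp [pvBinval]
  | cons c t ih =>
    intro x
    simp only [List.foldl_cons, pvBinval, List.length_cons]
    rw [ih, ih (2 * 0 + _)]
    ring

-- single-character str.replace is a map
theorem pv_go_single (o n : Char) :
    ∀ (fuel : Nat) (l acc : List Char), l.length ≤ fuel →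
      PySem.Chars.replace.go [o] [n] fuel l acc
        = acc.reverse ++ l.map (fun c => if c = o then n else c) := by
  intro fuel
  induction fuel with
  | zero => intro l acc h; simp at h; subst h; simp [PySem.Chars.replace.go]
  | succ f ih =>
    intro l acc h
    cases l with
    | nil => simp [PySem.Chars.replace.go]
    | cons c t =>
      simp only [PySem.Chars.replace.go, List.isPrefixOf]
      by_cases hc : c = o
      · subst hc
        simp only [beq_self_eq_true, Bool.and_true]
        rw [if_pos]
        · rw [ih _ _ (by simpa using Nat.le_of_succ_le_succ h)]
          simp
        · simp
      · rw [if_neg]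
        · rw [ih _ _ (by simpa using Nat.le_of_succ_le_succ h)]
          simp [hc]
        · simp [Ne.symm hc]

theorem pv_replace_single (cs : List Char) (o n : Char) :
    PySem.Chars.replace cs [o] [n] = cs.map (fun c => if c = o then n else c) := by
  rw [PySem.Chars.replace]
  simp only [List.isEmpty_cons, Bool.false_eq_true, if_false]
  exact (pv_go_single o n cs.length cs [] le_rfl).trans (by simp)

-- A's three replaces flip every bit of a '0'/'1' string
theorem pv_replace_chain (l : List Char) (h : ∀ c ∈ l, c = '0' ∨ c = '1') :
    PySem.Chars.replace (PySem.Chars.replace (PySem.Chars.replace l ['0'] ['t']) ['1'] ['0']) ['t'] ['1']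
      = l.map pvFlip := by
  rw [pv_replace_single, pv_replace_single, pv_replace_single, List.map_map, List.map_map]
  apply List.map_congr_left
  intro c hc
  rcases h c hc with h0 | h1 <;> subst_vars <;> simp [pvFlip]

-- A's loop builds exactly the prefix-majority bit string pvBits (bone - bzero) cs
theorem pvA_line (cs : List Char) :
    ∀ (z o : Int) (line : List Char),
      (cs.foldl pvStepA (z, o, line)).2.2 = line ++ pvBits (o - z) cs := by
  induction cs with
  | nil => intro z o line; simp [pvBits]
  | cons c t ih =>
    intro z o line
    rw [List.foldl_cons]
    by_cases hc : c = '0'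
    · subst hc
      have : pvStepA (z, o, line) '0'
          = (z + 1, o, line ++ [if o > z + 1 then '1' else '0']) := rfl
      rw [this, ih]
      simp only [pvBits, List.append_assoc, List.singleton_append]
      have h1 : o - (z + 1) = o - z + -1 := by ring
      have h2 : (o > z + 1) = (o - z + -1 > 0) := by
        simp only [eq_iff_iff]; omega
      simp [h1, h2]
    · have : pvStepA (z, o, line) c
          = (z, o + 1, line ++ [if o + 1 > z then '1' else '0']) := by
        simp [pvStepA, hc]
      rw [this, ih]
      simp only [pvBits, List.append_assoc, List.singleton_append]
      have h1 : o + 1 - z = o - z + 1 := by ring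
      have h2 : (o + 1 > z) = (o - z + 1 > 0) := by
        simp only [eq_iff_iff]; omega
      simp [hc, h1, h2]

-- B's accumulation loop builds exactly the running sums pvRun
theorem pvB_run (ds : List Int) :
    ∀ (acc : List Int) (t : Int),
      (ds.foldl pvStepAcc (acc, t)).1 = acc ++ pvRun t ds := by
  induction ds with
  | nil => intro acc t; simp [pvRun]
  | cons d tl ih =>
    intro acc t
    rw [List.foldl_cons]
    have : pvStepAcc (acc, t) d = (acc ++ [t + d], t + d) := rfl
    rw [this, ih]
    simp [pvRun]

theorem pvRun_length (ds : List Int) : ∀ t, (pvRun t ds).length = ds.length := by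
  induction ds with
  | nil => intro t; rfl
  | cons d tl ih => intro t; simp [pvRun, ih]

theorem pvBits_length (cs : List Char) : ∀ b, (pvBits b cs).length = cs.length := by
  induction cs with
  | nil => intro b; rfl
  | cons c t ih => intro b; simp [pvBits, ih]

theorem pvBits_mem (cs : List Char) :
    ∀ b, ∀ x ∈ pvBits b cs, x = '0' ∨ x = '1' := by
  induction cs with
  | nil => intro b x hx; simp [pvBits] at hx
  | cons c t ih =>
    intro b x hx
    simp only [pvBits, List.mem_cons] at hx
    rcases hx with hx | hx
    · subst hx
      by_cases hb : b + (if c = '0' then -1 else 1) > 0 <;> simp [hb]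
    · exact ih _ x hx

-- the prefix-majority bits are the positivity map of the running balance sums
theorem pvBits_eq_map (cs : List Char) :
    ∀ b, pvBits b cs = (pvRun b (pvDeltas cs)).map (fun x => if x > 0 then '1' else '0') := by
  induction cs with
  | nil => intro b; rfl
  | cons c t ih =>
    intro b
    simp only [pvBits, pvDeltas, List.map_cons, pvRun, ih]
    by_cases hc : c = '0' <;> simp [hc]

-- value of a concatenation of bit strings
theorem pvBinval_concat (a b : List Char) :
    pvBinval (a ++ b) = pvBinval a * 2 ^ b.length + pvBinval b := by
  have h := pvBinval_acc b (pvBinval a)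
  calc pvBinval (a ++ b)
      = b.foldl (fun x c => 2 * x + (if c = '0' then 0 else 1)) (pvBinval a) := by
        simp [pvBinval, List.foldl_append]
    _ = pvBinval a * 2 ^ b.length + pvBinval b := h

-- B's divide-and-conquer assembly computes the binary value of the positivity bits of the range
theorem pvChunk_eq (balances : List Int) :
    ∀ (k : Nat) (lo hi : Int), (hi - lo).toNat ≤ k → 0 ≤ lo → lo ≤ hi → hi ≤ balances.length →
      pvChunkVal balances lo hi
        = pvBinval (((balances.map (fun x => if x > 0 then '1' else '0')).drop lo.toNat).take
            (hi - lo).toNat) := by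
  intro k
  induction k with
  | zero =>
    intro lo hi hk h0 hlh hh
    have he : hi = lo := by omega
    subst he
    rw [pvChunkVal]
    simp [pvBinval]
  | succ k ih =>
    intro lo hi hk h0 hlh hh
    rw [pvChunkVal]
    by_cases h : hi - lo ≤ 1
    · rw [if_pos h]
      rcases (by omega : hi = lo ∨ hi = lo + 1) with he | he
      · subst he; simp [pvBinval]
      · subst he
        have hlt : lo.toNat < (balances.map (fun x => if x > 0 then '1' else '0')).length := by
          simp [List.length_map]; omega
        have hlt' : lo.toNat < balances.length := by simpa using hlt
        rw [List.drop_eq_getElem_cons hlt]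
        have h1 : (lo + 1 - lo).toNat = 1 := by omega
        rw [h1]
        have hget : PySem.List.pyGet? balances lo = balances[lo.toNat]? := by
          conv_lhs => rw [show lo = ((lo.toNat : Nat) : Int) by omega]
          simp only [PySem.List.pyGet?_natCast]
        rw [hget, List.getElem?_eq_getElem hlt']
        simp only [List.getElem_map, List.take_succ_cons, List.take_zero, Option.getD_some]
        by_cases hb : balances[lo.toNat] > 0 <;> simp [hb, pvBinval]
    · rw [if_neg h]
      have hme : PySem.Int.floordiv (lo + hi) 2 = (lo + hi) / 2 :=
        PySem.Int.floordiv_eq_ediv_of_pos (by norm_num)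
      set m := PySem.Int.floordiv (lo + hi) 2 with hm
      have hb1 : lo < m := by omega
      have hb2 : m < hi := by omega
      change pvChunkVal balances lo m <<< (hi - m).toNat + pvChunkVal balances m hi = _
      rw [ih lo m (by omega) h0 (by omega) (by omega),
          ih m hi (by omega) (by omega) (by omega) hh]
      set L := balances.map (fun x => if x > 0 then '1' else '0') with hL
      have hLlen : (L.length : Int) = balances.length := by simp [hL]
      have hsplit : (L.drop lo.toNat).take (hi - lo).toNat
          = (L.drop lo.toNat).take (m - lo).toNat ++ (L.drop m.toNat).take (hi - m).toNat := by
        rw [show (hi - lo).toNat = (m - lo).toNat + (hi - m).toNat by omega, List.take_add]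
        congr 2
        rw [List.drop_drop]
        congr 1
        omega
      rw [hsplit, pvBinval_concat]
      have hrlen : ((L.drop m.toNat).take (hi - m).toNat).length = (hi - m).toNat := by
        rw [List.length_take, List.length_drop]
        omega
      rw [hrlen]
      have hsh : pvChunkVal balances lo m <<< (hi - m).toNat
          = pvChunkVal balances lo m * 2 ^ (hi - m).toNat := by
        simp [Int.shiftLeft_eq]
      -- both sides already rewritten via the IHs; finish arithmetically
      rw [← ih lo m (by omega) h0 (by omega) (by omega), hsh,
          ih lo m (by omega) h0 (by omega) (by omega)]

-- value of a bit string plus value of its flip, with accumulators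
theorem pv_flipsum (l : List Char) (h : ∀ c ∈ l, c = '0' ∨ c = '1') :
    ∀ a b : Int,
      (l.map pvFlip).foldl (fun a c => 2 * a + (if c = '0' then 0 else 1)) b
        + l.foldl (fun a c => 2 * a + (if c = '0' then 0 else 1)) a
      = (a + b + 1) * 2 ^ l.length - 1 := by
  induction l with
  | nil => intro a b; simp; ring
  | cons c t ih =>
    intro a b
    have ht : ∀ x ∈ t, x = '0' ∨ x = '1' := fun x hx => h x (List.mem_cons_of_mem c hx)
    rcases h c (List.mem_cons_self) with hc | hc <;> subst hc <;>
      simp only [List.map_cons, List.foldl_cons, pvFlip, List.length_cons] <;>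
      rw [ih ht] <;> [skip; skip] <;> ring_nf <;> simp <;> ring

-- ===== VERDICT (by name: the statement is the Claim_ definition above) =====
theorem binary_operation_spec : Claim_equal_binary_operation := by
  intro s _ hpre
  unfold Spec_binary_operation
  have hcs : s.toList ≠ [] := by
    intro hnil
    exact hpre (String.toList_eq_nil_iff.mp hnil)
  -- A's new_line is the prefix-majority bit string
  set line := pvBits 0 s.toList with hline
  have hA : (s.toList.foldl pvStepA ((0 : Int), (0 : Int), ([] : List Char))).2.2 = line := by
    rw [pvA_line]; simp [hline]
  have hbits : ∀ c ∈ line, c = '0' ∨ c = '1' := pvBits_mem s.toList 0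
  have hlen : line.length = s.toList.length := pvBits_length s.toList 0
  have hne : line ≠ [] := by
    intro h0
    apply hcs
    rw [h0] at hlen
    exact List.length_eq_zero_iff.mp hlen.symm
  -- B's balances and value
  have hbal : ((pvDeltas s.toList).foldl pvStepAcc ([], 0)).1 = pvRun 0 (pvDeltas s.toList) := by
    rw [pvB_run]; simp
  have hbl : (pvRun 0 (pvDeltas s.toList)).length = s.toList.length := by
    rw [pvRun_length]; simp [pvDeltas]
  have hval : pvBinval ((pvRun 0 (pvDeltas s.toList)).map (fun x => if x > 0 then '1' else '0'))
      = pvBinval line := by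
    rw [hline, pvBits_eq_map]
  simp only [binary_operation, binary_operation_alt]
  rw [hA, hbal]
  have hchunk : pvChunkVal (pvRun 0 (pvDeltas s.toList)) 0
      (((pvRun 0 (pvDeltas s.toList)).length : Nat) : Int) = pvBinval line := by
    rw [pvChunk_eq _ (((pvRun 0 (pvDeltas s.toList)).length : Nat)) 0 _
        (by simp) le_rfl (by positivity) le_rfl]
    simp only [Int.toNat_zero, List.drop_zero, sub_zero, Int.toNat_natCast]
    rw [List.take_of_length_le (by simp [List.length_map])]
    exact hval
  rw [hchunk]
  rw [pv_replace_chain line hbits]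
  simp only [pvIntBin?]
  rw [if_neg (by simpa using hne), if_neg (by simp [hne])]
  simp only [Option.getD_some]
  have hflip := pv_flipsum line hbits 0 0
  have hnn : ((pvRun 0 (pvDeltas s.toList)).length : Int).toNat = line.length := by
    rw [hbl, hlen]; simp
  rw [hnn]
  have hsh : (1 : Int) <<< line.length = 2 ^ line.length := by simp [Int.shiftLeft_eq]
  rw [hsh]
  have hfv : (line.map pvFlip).foldl (fun a c => 2 * a + (if c = '0' then 0 else 1)) 0
      = 2 ^ line.length - 1 - pvBinval line := by
    simp [pvBinval] at hflip ⊢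
    linarith
  rw [hfv]
  rfl
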